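-- pv_equiv track=rewrite | github.com/kaaveland/advent-of-code-py | y2024/day_15.py | parse_wide
-- ===== SOURCE A (Python) =====
-- from typing import TypeAlias
--
-- Pos: TypeAlias = tuple[int, int]
--
-- Walls: TypeAlias = set[Pos]
--
-- Boxes: TypeAlias = set[Pos]
--
-- def parse(inp: str) -> tuple[Walls, Boxes, str, Pos]:
--     warehouse, instructions = inp.split("\n\n")
--     walls: Walls = set()
--     boxes: Boxes = set()
--     bot = (0, 0)
--     for y, line in enumerate(inp.splitlines()):
--         for x, c in enumerate(line):
--             if c == "#":
--                 walls.add((x, y))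
--             elif c == "O":
--                 boxes.add((x, y))
--             elif c == "@":
--                 bot = (x, y)
--     assert bot != (0, 0)
--     return walls, boxes, instructions.replace("\n", ""), bot
--
-- def parse_wide(inp: str) -> tuple[Walls, Boxes, str, Pos]:
--     walls, boxes, instructions, bot = parse(inp)
--     boxes = {(x * 2, y) for x, y in boxes}
--     extended_walls = set()
--     for x, y in walls:
--         extended_walls.add((2 * x, y))
--         extended_walls.add((2 * x + 1, y))
--     return extended_walls, boxes, instructions, (bot[0] * 2, bot[1])
-- ===== SOURCE B (Python) =====
-- def parse_wide(inp: str):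
--     _, instructions = inp.split("\n\n")
--     cells = [(x, y, c) for y, line in enumerate(inp.splitlines()) for x, c in enumerate(line)]
--     walls = {w for x, y, c in cells if c == "#" for w in ((2 * x, y), (2 * x + 1, y))}
--     boxes = {(2 * x, y) for x, y, c in cells if c == "O"}
--     ats = [(2 * x, y) for x, y, c in cells if c == "@"]
--     bot = ats[-1] if ats else (0, 0)
--     assert bot != (0, 0)
--     return walls, boxes, instructions.replace("\n", ""), bot
-- ===== Notes on version B (the rewrite author's own statement) =====
-- stated objective: alternative
-- what changed: B replaces A's stateful parse-then-rebuild pipeline (a character-scan state machine building narrow sets, then two widening rebuild passes) by a declarative pipeline: materialise the flat cell list once, then derive walls, boxes and the bot position by independent comprehensions/filters over it, taking the bot as the last '@' cell.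
-- outside the precondition, e.g. on parse_wide('@'): A raises ValueError, B raises ValueError; on parse_wide('\n\n'): A raises AssertionError, B raises AssertionError
import Mathlib
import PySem

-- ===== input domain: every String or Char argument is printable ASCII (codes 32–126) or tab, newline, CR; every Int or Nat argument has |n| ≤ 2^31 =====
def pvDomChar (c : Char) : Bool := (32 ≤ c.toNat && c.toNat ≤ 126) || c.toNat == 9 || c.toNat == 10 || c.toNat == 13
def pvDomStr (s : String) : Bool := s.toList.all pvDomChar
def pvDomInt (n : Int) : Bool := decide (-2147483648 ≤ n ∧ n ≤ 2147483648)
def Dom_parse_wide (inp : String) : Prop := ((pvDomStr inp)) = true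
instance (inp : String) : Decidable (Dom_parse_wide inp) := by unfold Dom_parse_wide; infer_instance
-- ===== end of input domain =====

-- B replaces A's stateful scan-then-widen pipeline by a declarative one: a flat cell list built
-- once, from which walls/boxes/bot are derived by independent filters (objective: alternative).

-- ===== PORT A =====
-- inner loop of 'parse' over one line's characters (state = walls, boxes, bot)
def pvParseLine (y : Int) (st : PySem.Set (Int × Int) × PySem.Set (Int × Int) × (Int × Int))
    (line : String) : PySem.Set (Int × Int) × PySem.Set (Int × Int) × (Int × Int) :=
  (PySem.List.enumerate line.toList).foldl (fun st xc =>
    if xc.2 = '#' then (PySem.Set.add st.1 (xc.1, y), st.2.1, st.2.2)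
    else if xc.2 = 'O' then (st.1, PySem.Set.add st.2.1 (xc.1, y), st.2.2)
    else if xc.2 = '@' then (st.1, st.2.1, (xc.1, y))
    else st) st

-- port of helper 'parse'; 'none' exactly where Python raises (unpack ValueError / failed assert)
def pvParse (inp : String) :
    Option ((List (Int × Int)) × (List (Int × Int)) × String × (Int × Int)) :=
  match PySem.Str.split? inp "\n\n" with
  | some [_warehouse, instructions] =>
    let st := (PySem.List.enumerate (PySem.Str.splitlines inp)).foldl
      (fun st yl => pvParseLine yl.1 st yl.2)
      (PySem.Set.empty, PySem.Set.empty, ((0 : Int), (0 : Int)))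
    if st.2.2 = ((0 : Int), (0 : Int)) then none
    else some (st.1, st.2.1, PySem.Str.replace instructions "\n" "", st.2.2)
  | _ => none

def parse_wide (inp : String) :
    (List (Int × Int)) × (List (Int × Int)) × String × (Int × Int) :=
  match pvParse inp with
  | none => ([], [], "", (0, 0))   -- Python raises here; excluded by Pre_parse_wide
  | some (walls, boxes, instructions, bot) =>
    let boxes' := PySem.Set.ofList (boxes.map (fun p => (p.1 * 2, p.2)))
    let extended_walls := walls.foldl
      (fun s p => PySem.Set.add (PySem.Set.add s (2 * p.1, p.2)) (2 * p.1 + 1, p.2))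
      PySem.Set.empty
    (extended_walls, boxes', instructions, (bot.1 * 2, bot.2))

-- ===== PORT B =====
-- the flat cell list [(x, y, c) …] of B
def pvCells (inp : String) : List (Int × Int × Char) :=
  (PySem.List.enumerate (PySem.Str.splitlines inp)).flatMap (fun yl =>
    (PySem.List.enumerate yl.2.toList).map (fun xc => (xc.1, yl.1, xc.2)))

def parse_wide_alt (inp : String) :
    (List (Int × Int)) × (List (Int × Int)) × String × (Int × Int) :=
  match PySem.Str.split? inp "\n\n" with
  | some [_warehouse, instructions] =>
    let cells := pvCells inp
    let walls := PySem.Set.ofList ((cells.filter (fun c => c.2.2 == '#')).flatMap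
      (fun c => [(2 * c.1, c.2.1), (2 * c.1 + 1, c.2.1)]))
    let boxes := PySem.Set.ofList ((cells.filter (fun c => c.2.2 == 'O')).map
      (fun c => (2 * c.1, c.2.1)))
    let ats := (cells.filter (fun c => c.2.2 == '@')).map (fun c => (2 * c.1, c.2.1))
    let bot := ats.getLast?.getD ((0 : Int), (0 : Int))
    if bot = ((0 : Int), (0 : Int)) then ([], [], "", (0, 0))   -- assert fails: Python raises
    else (walls, boxes, PySem.Str.replace instructions "\n" "", bot)
  | _ => ([], [], "", (0, 0))   -- unpack fails: Python raises

-- ===== PRECONDITION & SPEC =====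
-- Pre_ excludes exactly the inputs on which A raises: a ValueError when the input does not have
-- exactly one "\n\n" (the two-way unpack fails), and the AssertionError when the scan leaves
-- bot = (0,0), i.e. when the only '@' is the very first character or there is no '@' at all.
def Pre_parse_wide (inp : String) : Prop :=
  PySem.Str.count inp "\n\n" = 1 ∧ PySem.Str.isIn "@" inp = true ∧
    ¬ (PySem.Str.startswith inp "@" = true ∧ PySem.Str.count inp "@" = 1)
instance (inp : String) : Decidable (Pre_parse_wide inp) := by unfold Pre_parse_wide; infer_instance

def pvWitness_parse_wide : String := "#@O\n\nv<"

def Spec_parse_wide (inp : String) (out : (List (Int × Int)) × (List (Int × Int)) × String × (Int × Int)) : Prop := out = parse_wide_alt inp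
instance (inp : String) (out : (List (Int × Int)) × (List (Int × Int)) × String × (Int × Int)) : Decidable (Spec_parse_wide inp out) := by unfold Spec_parse_wide; infer_instance

-- ===== CLAIM (what is proved, stated in full; the proofs are below) =====
def Claim_equal_parse_wide : Prop := ∀ (inp : String), Dom_parse_wide inp → Pre_parse_wide inp → Spec_parse_wide inp (parse_wide inp)

-- ===== LEMMAS AND PROOFS =====

-- A's per-character step, as a function of a flat cell (x, y, c)
def pvStep (st : PySem.Set (Int × Int) × PySem.Set (Int × Int) × (Int × Int))
    (c : Int × Int × Char) : PySem.Set (Int × Int) × PySem.Set (Int × Int) × (Int × Int) :=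
  if c.2.2 = '#' then (PySem.Set.add st.1 (c.1, c.2.1), st.2.1, st.2.2)
  else if c.2.2 = 'O' then (st.1, PySem.Set.add st.2.1 (c.1, c.2.1), st.2.2)
  else if c.2.2 = '@' then (st.1, st.2.1, (c.1, c.2.1))
  else st

-- A's nested scan is a single fold of pvStep over the flat cell list
lemma pvScan_flat (inp : String) (st : PySem.Set (Int × Int) × PySem.Set (Int × Int) × (Int × Int)) :
    (PySem.List.enumerate (PySem.Str.splitlines inp)).foldl
        (fun st yl => pvParseLine yl.1 st yl.2) st
      = (pvCells inp).foldl pvStep st := by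
  rw [pvCells, List.foldl_flatMap]
  have h : ∀ (st : PySem.Set (Int × Int) × PySem.Set (Int × Int) × (Int × Int)) (yl : Int × String),
      pvParseLine yl.1 st yl.2
        = ((PySem.List.enumerate yl.2.toList).map (fun xc => (xc.1, yl.1, xc.2))).foldl pvStep st := by
    intro st yl
    rw [List.foldl_map, pvParseLine]
    rfl
  simp only [h]

-- first-occurrence dedup relative to a seen set, mirroring repeated PySem.Set.add
def pvDedup (s : List (Int × Int)) : List (Int × Int) → List (Int × Int)
  | [] => []
  | x :: xs => if x ∈ s then pvDedup s xs else x :: pvDedup (s ++ [x]) xs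

lemma foldl_add_eq_append_pvDedup (l : List (Int × Int)) :
    ∀ s : PySem.Set (Int × Int), l.foldl PySem.Set.add s = s ++ pvDedup s l := by
  induction l with
  | nil => intro s; simp [pvDedup]
  | cons x xs ih =>
    intro s
    by_cases h : x ∈ s
    · simp [pvDedup, h, ih s]
    · simp [pvDedup, h, ih (s ++ [x])]

lemma update_of_subset (m : List (Int × Int)) (t : PySem.Set (Int × Int))
    (h : ∀ y ∈ m, y ∈ t) : PySem.Set.update t m = t := by
  induction m generalizing t with
  | nil => simp [PySem.Set.update_nil]
  | cons x xs ih =>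
    rw [PySem.Set.update_cons, PySem.Set.add_of_mem (h x (by simp))]
    exact ih t (fun y hy => h y (by simp [hy]))

-- key: deduplicating the narrow list first does not change the widened set
lemma update_flatMap_pvDedup (f : Int × Int → List (Int × Int)) (l : List (Int × Int)) :
    ∀ (s : List (Int × Int)) (t : PySem.Set (Int × Int)),
      (∀ x ∈ s, ∀ y ∈ f x, y ∈ t) →
      PySem.Set.update t (l.flatMap f) = PySem.Set.update t ((pvDedup s l).flatMap f) := by
  induction l with
  | nil => intro s t _; rfl
  | cons x xs ih =>
    intro s t h
    by_cases hx : x ∈ s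
    · rw [pvDedup, if_pos hx, List.flatMap_cons, PySem.Set.update_append,
        update_of_subset (f x) t (h x hx)]
      exact ih s t h
    · rw [pvDedup, if_neg hx, List.flatMap_cons, List.flatMap_cons,
        PySem.Set.update_append, PySem.Set.update_append]
      apply ih (s ++ [x])
      intro z hz y hy
      rcases List.mem_append.1 hz with hz | hz
      · exact (PySem.Set.mem_update _ _ _).2 (Or.inl (h z hz y hy))
      · simp only [List.mem_singleton] at hz
        subst hz
        exact (PySem.Set.mem_update _ _ _).2 (Or.inr hy)

lemma ofList_flatMap_ofList (f : Int × Int → List (Int × Int)) (l : List (Int × Int)) :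
    PySem.Set.ofList ((PySem.Set.ofList l).flatMap f) = PySem.Set.ofList (l.flatMap f) := by
  have h1 : PySem.Set.ofList l = pvDedup [] l := by
    have := foldl_add_eq_append_pvDedup l []
    simpa [PySem.Set.ofList_eq_foldl] using this
  rw [h1, ← PySem.Set.update_nil_left, ← PySem.Set.update_nil_left]
  exact (update_flatMap_pvDedup f l [] [] (by simp)).symm

lemma lastD_cons (a d : Int × Int) (m : List (Int × Int)) :
    ((a :: m).getLast?).getD d = m.getLast?.getD a := by
  cases m <;> simp [List.getLast?_cons]

-- characterisation of the fold of pvStep: three independent passes over the cell list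
lemma pvScan_components (l : List (Int × Int × Char)) :
    ∀ st : PySem.Set (Int × Int) × PySem.Set (Int × Int) × (Int × Int),
    l.foldl pvStep st =
      (((l.filter (fun c => c.2.2 == '#')).map (fun c => (c.1, c.2.1))).foldl PySem.Set.add st.1,
       ((l.filter (fun c => c.2.2 == 'O')).map (fun c => (c.1, c.2.1))).foldl PySem.Set.add st.2.1,
       (((l.filter (fun c => c.2.2 == '@')).map (fun c => (c.1, c.2.1))).getLast?).getD st.2.2) := by
  induction l with
  | nil => intro st; rfl
  | cons c xs ih =>
    intro st
    rw [List.foldl_cons, ih (pvStep st c)]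
    by_cases h1 : c.2.2 = '#'
    · simp [pvStep, h1]
    · by_cases h2 : c.2.2 = 'O'
      · simp [pvStep, h2]
      · by_cases h3 : c.2.2 = '@'
        · simp [pvStep, h3, lastD_cons]
        · simp [pvStep, h1, h2, h3]

-- A's wall-widening fold is set-of-flatMap
lemma pvWiden_fold (s : List (Int × Int)) :
    ∀ t : PySem.Set (Int × Int),
    s.foldl (fun t p => PySem.Set.add (PySem.Set.add t (2 * p.1, p.2)) (2 * p.1 + 1, p.2)) t
      = PySem.Set.update t (s.flatMap (fun p => [(2 * p.1, p.2), (2 * p.1 + 1, p.2)])) := by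
  induction s with
  | nil => intro t; rfl
  | cons p s ih =>
    intro t
    rw [List.foldl_cons, ih, List.flatMap_cons, PySem.Set.update_append]
    rfl

theorem parse_wide_eq_alt (inp : String) : parse_wide inp = parse_wide_alt inp := by
  rw [parse_wide, pvParse, parse_wide_alt]
  cases hsp : PySem.Str.split? inp "\n\n" with
  | none => rfl
  | some parts =>
    match parts with
    | [] => rfl
    | [_] => rfl
    | _ :: _ :: _ :: _ => rfl
    | [w, instr] =>
      simp only
      rw [pvScan_flat, pvScan_components]
      simp only
      -- names for the three narrow lists
      set l := pvCells inp with hl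
      set Wn := (l.filter (fun c => c.2.2 == '#')).map (fun c => (c.1, c.2.1)) with hWn
      set Bn := (l.filter (fun c => c.2.2 == 'O')).map (fun c => (c.1, c.2.1)) with hBn
      set An := (l.filter (fun c => c.2.2 == '@')).map (fun c => (c.1, c.2.1)) with hAn
      -- bot as seen by B is the widening of the narrow last '@'
      have hbot : ((l.filter (fun c => c.2.2 == '@')).map (fun c => ((2 * c.1, c.2.1) : Int × Int))).getLast?
          = An.getLast?.map (fun p => (2 * p.1, p.2)) := by
        rw [hAn]
        cases hfl : (l.filter (fun c => c.2.2 == '@')).getLast? <;>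
          simp [List.getLast?_map, hfl]
      cases hA : An.getLast? with
      | none =>
        rw [hbot]
        simp only [hA, Option.map_none, Option.getD_none]
        rfl
      | some p =>
        rw [hbot]
        simp only [hA, Option.map_some, Option.getD_some]
        by_cases hz : p = ((0:Int),(0:Int))
        · subst hz
          rfl
        · have hg1 : ((2 * p.1, p.2) : Int × Int) ≠ ((0:Int),(0:Int)) := by
            intro hcon
            apply hz
            have e1 : 2 * p.1 = (0:Int) := congrArg Prod.fst hcon
            have e2 : p.2 = (0:Int) := congrArg Prod.snd hcon
            exact Prod.ext (by omega) e2
          rw [if_neg hz, if_neg hg1]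
          have hW : (Wn.foldl PySem.Set.add PySem.Set.empty).foldl
              (fun s p => PySem.Set.add (PySem.Set.add s (2 * p.1, p.2)) (2 * p.1 + 1, p.2))
              PySem.Set.empty
              = PySem.Set.ofList ((l.filter (fun c => c.2.2 == '#')).flatMap
                  (fun c => [(2 * c.1, c.2.1), (2 * c.1 + 1, c.2.1)])) := by
            rw [pvWiden_fold, PySem.Set.update_empty]
            have h1 : Wn.foldl PySem.Set.add PySem.Set.empty = PySem.Set.ofList Wn := rfl
            rw [h1, ofList_flatMap_ofList, hWn, List.flatMap_map]
          have hB : PySem.Set.ofList ((Bn.foldl PySem.Set.add PySem.Set.empty).map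
                (fun p => (p.1 * 2, p.2)))
              = PySem.Set.ofList ((l.filter (fun c => c.2.2 == 'O')).map
                  (fun c => (2 * c.1, c.2.1))) := by
            have h1 : Bn.foldl PySem.Set.add PySem.Set.empty = PySem.Set.ofList Bn := rfl
            rw [h1, List.map_eq_flatMap, ofList_flatMap_ofList, ← List.map_eq_flatMap]
            rw [hBn, List.map_map]
            have : List.map ((fun x : Int × Int => (x.1 * 2, x.2)) ∘ fun c : Int × Int × Char => (c.1, c.2.1))
                (List.filter (fun c => c.2.2 == 'O') l)
                = List.map (fun c : Int × Int × Char => ((2 * c.1, c.2.1) : Int × Int))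
                  (List.filter (fun c => c.2.2 == 'O') l) :=
              List.map_congr_left (fun c _ => by show ((c.1 * 2, c.2.1) : Int × Int) = (2 * c.1, c.2.1); rw [mul_comm])
            rw [this]
          exact Prod.ext hW (Prod.ext hB (Prod.ext rfl (Prod.ext (mul_comm p.1 2) rfl)))

theorem parse_wide_spec : Claim_equal_parse_wide := by
  intro inp _ _
  unfold Spec_parse_wide
  exact parse_wide_eq_alt inp
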